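-- pv_equiv track=rewrite | github.com/Maksoud/py-exercises-001 | oldMacdonald.py | old_macdonald
-- ===== SOURCE A (Python) =====
-- def old_macdonald(name):
--
--     result = []
--
--     for idx, letter in enumerate(name):
--
--         if (idx == 0) or (idx == 3):
--             result.append(letter.capitalize())
--         else:
--             result.append(letter)
--
--     return ''.join(result)
-- ===== SOURCE B (Python) =====
-- def old_macdonald(name):
--     chars = list(name)
--     if len(chars) > 0:
--         chars[0] = chars[0].capitalize()
--     if len(chars) > 3:
--         chars[3] = chars[3].capitalize()
--     return ''.join(chars)
-- ===== Notes on version B (the rewrite author's own statement) =====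
-- stated objective: simpler
-- what changed: Replaces the per-character enumerate loop with an index test in every iteration by two direct positional assignments into a char list built once (no Python-level loop).
import Mathlib
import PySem

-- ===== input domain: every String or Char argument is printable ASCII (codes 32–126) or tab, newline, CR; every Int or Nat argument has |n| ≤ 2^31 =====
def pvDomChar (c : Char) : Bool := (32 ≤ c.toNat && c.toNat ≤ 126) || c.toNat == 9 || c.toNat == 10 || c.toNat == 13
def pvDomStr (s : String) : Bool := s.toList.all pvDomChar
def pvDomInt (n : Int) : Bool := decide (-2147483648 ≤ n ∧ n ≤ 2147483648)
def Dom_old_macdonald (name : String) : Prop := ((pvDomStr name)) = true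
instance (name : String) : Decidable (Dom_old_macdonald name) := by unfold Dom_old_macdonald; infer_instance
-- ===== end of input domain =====

-- B replaces the per-character scan-with-index-test by two direct positional updates (simpler decomposition).
-- ===== PORT A =====
def old_macdonald (name : String) : String :=
  let result : List Char :=
    (PySem.List.enumerate name.toList).foldl
      (fun acc (p : Int × Char) =>
        acc ++ [if p.1 == 0 || p.1 == 3 then PySem.Chars.upperChar p.2 else p.2]) []
  String.ofList result

-- ===== PORT B =====
def old_macdonald_alt (name : String) : String :=
  let chars := name.toList
  let chars := if chars.length > 0 then chars.set 0 (PySem.Chars.upperChar chars[0]!) else chars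
  let chars := if chars.length > 3 then chars.set 3 (PySem.Chars.upperChar chars[3]!) else chars
  String.ofList chars

-- ===== PRECONDITION & SPEC =====
def Spec_old_macdonald (name : String) (out : String) : Prop := out = old_macdonald_alt name
instance (name : String) (out : String) : Decidable (Spec_old_macdonald name out) := by unfold Spec_old_macdonald; infer_instance

-- ===== CLAIM (what is proved, stated in full; the proofs are below) =====
def Claim_equal_old_macdonald : Prop := ∀ (name : String), Dom_old_macdonald name → Spec_old_macdonald name (old_macdonald name)

-- ===== LEMMAS AND PROOFS =====

-- ===== VERDICT (by name: the statement is the Claim_ definition above) =====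
-- for indices ≥ 4 the loop body is the identity
lemma pvA_tail (l : List Char) (s : Int) (hs : 4 ≤ s) :
    (PySem.List.enumerate l s).map
      (fun p : Int × Char => if p.1 = 0 ∨ p.1 = 3 then PySem.Chars.upperChar p.2 else p.2) = l := by
  induction l generalizing s with
  | nil => simp [PySem.List.enumerate_nil]
  | cons a t ih =>
    rw [PySem.List.enumerate_cons, List.map_cons, ih (s+1) (by omega)]
    have h : ¬ (s = 0 ∨ s = 3) := by omega
    simp [h]

lemma pv_core (l : List Char) :
    (PySem.List.enumerate l 0).map
      (fun p : Int × Char => if p.1 == 0 || p.1 == 3 then PySem.Chars.upperChar p.2 else p.2)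
    = (let c1 := if l.length > 0 then l.set 0 (PySem.Chars.upperChar l[0]!) else l
       if c1.length > 3 then c1.set 3 (PySem.Chars.upperChar c1[3]!) else c1) := by
  match l with
  | [] => simp [PySem.List.enumerate_nil]
  | [a] => simp [PySem.List.enumerate_cons, PySem.List.enumerate_nil]
  | [a,b] => simp [PySem.List.enumerate_cons, PySem.List.enumerate_nil]
  | [a,b,c] => simp [PySem.List.enumerate_cons, PySem.List.enumerate_nil]
  | a :: b :: c :: d :: t =>
    simp only [PySem.List.enumerate_cons, List.map_cons]
    norm_num
    rw [pvA_tail t 4 (by norm_num)]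

theorem old_macdonald_spec : Claim_equal_old_macdonald := by
  intro name _
  unfold Spec_old_macdonald old_macdonald old_macdonald_alt
  simp only [PySem.List.foldl_append_singleton_eq_map, List.nil_append]
  rw [pv_core]
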